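-- pv_equiv track=rewrite | github.com/Justtuchthat/AdventOfCode2023 | day2/challenge2/main.py | getGamePower
-- ===== SOURCE A (Python) =====
-- def getGamePower(gameData):
--     leastRedNeeded = 0
--     leastGreenNeeded = 0
--     leastBlueNeeded = 0
--     for hand in gameData.split("; "):
--         for set in hand.split(', '):
--             match set.split(' '):
--                 case [val, "red"]:
--                     leastRedNeeded = max(int(val), leastRedNeeded)
--                 case [val, "green"]:
--                     leastGreenNeeded = max(int(val), leastGreenNeeded)
--                 case [val, "blue"]:
--                     leastBlueNeeded = max(int(val), leastBlueNeeded)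
--                 case _:
--                     Exception("Not RGB set in hand?")
--     return leastRedNeeded*leastGreenNeeded*leastBlueNeeded
-- ===== SOURCE B (Python) =====
-- def getGamePower(gameData):
--     # Phase 1: single parsing scan collecting (color, count) pairs for valid two-token sets.
--     pairs = []
--     for hand in gameData.split("; "):
--         for s in hand.split(', '):
--             toks = s.split(' ')
--             if len(toks) == 2 and toks[1] in ("red", "green", "blue"):
--                 pairs.append((toks[1], int(toks[0])))
--     # Phase 2: group counts per color into a table.
--     counts = {}
--     for color, val in pairs:
--         counts[color] = counts.get(color, []) + [val]
--     # Phase 3: reduce - product of the per-color maxima (0 when a color is absent).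
--     power = 1
--     for color in ("red", "green", "blue"):
--         power *= max([0, *counts.get(color, [])])
--     return power
-- ===== Notes on version B (the rewrite author's own statement) =====
-- stated objective: alternative
-- what changed: Instead of A's three inline running-max variables updated inside the nested parsing loops, B first collects all valid (colour, count) pairs in one parsing pass, then groups them into a dict of per-colour count lists, and finally returns the product of the per-colour maxima (default 0) in a separate reduce pass.
import Mathlib
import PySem

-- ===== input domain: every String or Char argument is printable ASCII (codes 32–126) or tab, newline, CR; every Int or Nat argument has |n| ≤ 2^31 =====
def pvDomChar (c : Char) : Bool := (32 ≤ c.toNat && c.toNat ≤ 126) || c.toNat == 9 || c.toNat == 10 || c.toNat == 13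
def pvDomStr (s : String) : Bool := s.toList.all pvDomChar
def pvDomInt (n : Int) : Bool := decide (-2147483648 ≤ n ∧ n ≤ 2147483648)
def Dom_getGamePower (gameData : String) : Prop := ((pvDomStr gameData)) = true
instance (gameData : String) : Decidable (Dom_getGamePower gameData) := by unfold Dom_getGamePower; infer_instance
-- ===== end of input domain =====

-- B replaces A's three inline running-max variables by a collect-pairs / group-into-table / reduce-to-product
-- decomposition (same parsing, same results); objective: alternative decomposition, no speed claim.


-- shared primitives:
-- s.split(sep) with a NONEMPTY literal sep (PySem.Str.split? is none only for sep = "", never here)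
def pvSplit (s sep : String) : List String := (PySem.Str.split? s sep).getD []
-- int(val); Pre_ excludes the inputs where Python's int() raises, so the getD 0 default is never observed
def pvIv (v : String) : Int := (PySem.Int.ofStr? v).getD 0

-- ===== PORT A =====
-- one dispatch of A's match statement: a two-element list is tested against "red"/"green"/"blue" in order
-- (Python's `case [val, "red"]` chain IS this list-shape match plus if-chain); the wildcard case only
-- constructs an Exception without raising it, a no-op
def pvStepA (st : Int × Int × Int) (set : String) : Int × Int × Int :=
  match pvSplit set " " with
  | [val, c] =>
      if c = "red" then (max (pvIv val) st.1, st.2.1, st.2.2)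
      else if c = "green" then (st.1, max (pvIv val) st.2.1, st.2.2)
      else if c = "blue" then (st.1, st.2.1, max (pvIv val) st.2.2)
      else st
  | _ => st

def getGamePower (gameData : String) : Int :=
  let st := (pvSplit gameData "; ").foldl
    (fun st hand => (pvSplit hand ", ").foldl pvStepA st) ((0 : Int), (0 : Int), (0 : Int))
  st.1 * st.2.1 * st.2.2

-- ===== PORT B =====
-- phase-1 body: append (toks[1], int(toks[0])) when the set has exactly two tokens and a known colour
def pvStepPairs (acc : List (String × Int)) (set : String) : List (String × Int) :=
  match pvSplit set " " with
  | [val, c] =>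
      if c = "red" ∨ c = "green" ∨ c = "blue" then acc ++ [(c, pvIv val)] else acc
  | _ => acc

def getGamePower_alt (gameData : String) : Int :=
  let pairs := (pvSplit gameData "; ").foldl
    (fun acc hand => (pvSplit hand ", ").foldl pvStepPairs acc) ([] : List (String × Int))
  let counts := pairs.foldl (fun d p => d.modify p.1 [] (· ++ [p.2])) (PySem.Dict.empty : PySem.Dict String (List Int))
  (["red", "green", "blue"]).foldl
    (fun power color => power * (PySem.List.max? ((0 : Int) :: counts.getD color []) (fun y => y)).getD 0) 1

-- ===== PRECONDITION & SPEC =====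
-- true iff this colour set does not make Python's int() raise: a two-token set with a known colour must have an int-parsable count
def pvPreSet (set : String) : Bool :=
  match pvSplit set " " with
  | [val, c] => !(c == "red" || c == "green" || c == "blue") || (PySem.Int.ofStr? val).isSome
  | _ => true

-- Pre_ excludes exactly the inputs where A raises ValueError (int() applied to a non-integer count in a matched colour set)
def Pre_getGamePower (gameData : String) : Prop :=
  ∀ hand ∈ pvSplit gameData "; ", ∀ s ∈ pvSplit hand ", ", pvPreSet s = true
instance (gameData : String) : Decidable (Pre_getGamePower gameData) := by unfold Pre_getGamePower; infer_instance

def pvWitness_getGamePower : String := "1 red, 2 green; 3 blue"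

def Spec_getGamePower (gameData : String) (out : Int) : Prop := out = getGamePower_alt gameData
instance (gameData : String) (out : Int) : Decidable (Spec_getGamePower gameData out) := by unfold Spec_getGamePower; infer_instance

-- ===== CLAIM (what is proved, stated in full; the proofs are below) =====
def Claim_equal_getGamePower : Prop := ∀ (gameData : String), Dom_getGamePower gameData → Pre_getGamePower gameData → Spec_getGamePower gameData (getGamePower gameData)

-- ===== LEMMAS AND PROOFS =====

-- the (colour, count) pair a colour set contributes, if any
def pvParse (set : String) : Option (String × Int) :=
  match pvSplit set " " with
  | [val, c] => if c = "red" ∨ c = "green" ∨ c = "blue" then some (c, pvIv val) else none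
  | _ => none

-- the counts of colour c, in scan order
def pvVals (c : String) (sets : List String) : List Int :=
  sets.filterMap (fun s =>
    match pvSplit s " " with
    | [val, c'] => if c' = c then some (pvIv val) else none
    | _ => none)

-- A's nested loop is the loop over the flattened list of colour sets
theorem pv_foldl_hands {σ : Type} (g : σ → String → σ) (hands : List String) (st : σ) :
    hands.foldl (fun st hand => (pvSplit hand ", ").foldl g st) st
      = (hands.flatMap (fun hand => pvSplit hand ", ")).foldl g st := by
  induction hands generalizing st with
  | nil => rfl
  | cons h t ih => simp [List.foldl_cons, ih, List.flatMap_cons, List.foldl_append]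

-- A's running maxima over a list of sets, characterised by pvVals
theorem pv_stepA_char (sets : List String) (r g b : Int) :
    sets.foldl pvStepA (r, g, b)
      = ((pvVals "red" sets).foldl (fun a v => max v a) r,
         (pvVals "green" sets).foldl (fun a v => max v a) g,
         (pvVals "blue" sets).foldl (fun a v => max v a) b) := by
  induction sets generalizing r g b with
  | nil => rfl
  | cons s t ih =>
      simp only [pvStepA, pvVals, List.foldl_cons, List.filterMap_cons] at *
      cases hm : pvSplit s " " with
      | nil => simp [hm, ih]
      | cons x xs =>
        cases xs with
        | nil => simp [hm, ih]
        | cons y ys =>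
          cases ys with
          | nil =>
              by_cases hr : y = "red"
              · simp [hm, hr, ih]
              · by_cases hg : y = "green"
                · simp [hm, hr, hg, ih]
                · by_cases hb : y = "blue"
                  · simp [hm, hr, hg, hb, ih]
                  · simp [hm, hr, hg, hb, ih]
          | cons z zs => simp [hm, ih]

-- B's phase-1 loop collects exactly the parsed pairs
theorem pv_pairs_char (sets : List String) (acc : List (String × Int)) :
    sets.foldl pvStepPairs acc = acc ++ sets.filterMap pvParse := by
  induction sets generalizing acc with
  | nil => simp
  | cons s t ih =>
      rw [List.foldl_cons, ih, List.filterMap_cons]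
      cases hm : pvSplit s " " with
      | nil => simp [pvStepPairs, pvParse, hm]
      | cons x xs =>
        cases xs with
        | nil => simp [pvStepPairs, pvParse, hm]
        | cons y ys =>
          cases ys with
          | nil =>
              by_cases hc : y = "red" ∨ y = "green" ∨ y = "blue"
              · simp [pvStepPairs, pvParse, hm, hc]
              · simp [pvStepPairs, pvParse, hm, hc]
          | cons z zs => simp [pvStepPairs, pvParse, hm]

-- filtering the pair table by a known colour yields that colour's count list
theorem pv_filter_pairs (c : String) (hc : c = "red" ∨ c = "green" ∨ c = "blue") (sets : List String) :
    ((sets.filterMap pvParse).filter (fun p => p.1 == c)).map (fun p => p.2) = pvVals c sets := by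
  induction sets with
  | nil => rfl
  | cons s t ih =>
      simp only [pvParse, pvVals, List.filterMap_cons] at *
      cases hm : pvSplit s " " with
      | nil => simp [hm, ih]
      | cons x xs =>
        cases xs with
        | nil => simp [hm, ih]
        | cons y ys =>
          cases ys with
          | nil =>
              by_cases hyc : y = c
              · subst hyc; simp [hm, hc, ih]
              · by_cases hy : y = "red" ∨ y = "green" ∨ y = "blue"
                · simp [hm, hy, hyc, ih]
                · simp [hm, hy, hyc, ih]
          | cons z zs => simp [hm, ih]

-- a flipped running max is the running max
theorem pv_foldl_max_flip (l : List Int) (a : Int) :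
    l.foldl (fun a v => max v a) a = l.foldl max a := by
  induction l generalizing a with
  | nil => rfl
  | cons x lt ih => rw [List.foldl_cons, List.foldl_cons, ih, max_comm]

theorem pv_eq_everywhere (gameData : String) : getGamePower gameData = getGamePower_alt gameData := by
  unfold getGamePower getGamePower_alt
  rw [pv_foldl_hands pvStepA, pv_foldl_hands pvStepPairs]
  set sets := ((pvSplit gameData "; ").flatMap fun hand => pvSplit hand ", ") with hsets
  rw [pv_stepA_char, pv_pairs_char]
  simp only [List.nil_append]
  have hcount : ∀ c, ((sets.filterMap pvParse).foldl (fun d p => d.modify p.1 [] (· ++ [p.2]))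
        (PySem.Dict.empty : PySem.Dict String (List Int))).getD c [] =
      ((sets.filterMap pvParse).filter (fun p => p.1 == c)).map (fun p => p.2) := by
    intro c
    rw [PySem.Dict.getD_foldl_modify_append, PySem.Dict.getD_empty, List.nil_append]
  simp only [List.foldl_cons, List.foldl_nil, hcount,
    pv_filter_pairs "red" (Or.inl rfl), pv_filter_pairs "green" (Or.inr (Or.inl rfl)),
    pv_filter_pairs "blue" (Or.inr (Or.inr rfl)),
    PySem.List.max?_id_cons, Option.getD_some, pv_foldl_max_flip]
  ring

-- ===== VERDICT (by name: the statement is the Claim_ definition above) =====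
theorem getGamePower_spec : Claim_equal_getGamePower := by
  intro gameData _ _
  unfold Spec_getGamePower
  exact pv_eq_everywhere gameData
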